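-- pv_equiv track=rewrite | github.com/BayraktarLab/feature_reg | metadata_handling.py | get_dimension_size
-- ===== SOURCE A (Python) =====
-- def get_dimension_size(img_axes, img_shape):
--     dims = {'T': 1, 'Z': 1, 'C': 1}
--     for d in dims:
--         if d in img_axes:
--             idx = img_axes.index(d)
--             dim_size = img_shape[idx]
--             dims[d] = dim_size
--
--     return dims
-- ===== SOURCE B (Python) =====
-- def get_dimension_size(img_axes, img_shape):
--     dims = {'T': 1, 'Z': 1, 'C': 1}
--     seen = set()
--     for i, ch in enumerate(img_axes):
--         if ch in dims and ch not in seen: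
--             dims[ch] = img_shape[i]
--             seen.add(ch)
--     return dims
-- ===== Notes on version B (the rewrite author's own statement) =====
-- stated objective: idiomatic
-- what changed: One forward pass over the axes string with enumerate and a seen-set replaces the loop over the three keys that rescans the string with .index for each key.
import Mathlib
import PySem

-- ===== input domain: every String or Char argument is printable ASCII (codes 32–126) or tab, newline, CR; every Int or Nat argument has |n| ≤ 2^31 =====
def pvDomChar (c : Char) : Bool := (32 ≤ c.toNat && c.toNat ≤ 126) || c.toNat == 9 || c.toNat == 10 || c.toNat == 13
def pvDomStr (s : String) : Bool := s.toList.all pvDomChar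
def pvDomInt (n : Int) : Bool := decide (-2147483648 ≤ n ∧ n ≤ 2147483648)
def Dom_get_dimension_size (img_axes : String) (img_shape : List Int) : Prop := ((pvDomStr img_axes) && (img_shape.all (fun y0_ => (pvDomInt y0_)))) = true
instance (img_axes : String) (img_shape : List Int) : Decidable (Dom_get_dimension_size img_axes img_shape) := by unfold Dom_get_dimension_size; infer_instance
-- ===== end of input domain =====

-- B replaces A's per-key rescans of the axes string (.index for each of 'T','Z','C') by one
-- forward pass over the string with enumerate and a seen-set; same return value.

-- ===== PORT A =====
def get_dimension_size (img_axes : String) (img_shape : List Int) : List (String × Int) :=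
  -- dims = {'T': 1, 'Z': 1, 'C': 1}
  let dims : PySem.Dict String Int := PySem.Dict.ofList [("T", 1), ("Z", 1), ("C", 1)]
  -- for d in dims: …  (iterating the dict's keys, in insertion order)
  let dims := (["T", "Z", "C"] : List String).foldl (fun dims d =>
    if PySem.Str.isIn d img_axes then
      -- idx = img_axes.index(d): under the 'd in img_axes' guard, .index agrees with .find
      let idx := PySem.Str.find img_axes d
      -- dim_size = img_shape[idx]: idx ≥ 0 here; Python raises IndexError iff idx ≥ len(img_shape),
      -- which Pre_ excludes; the default 0 is never claimed
      let dim_size := PySem.List.pyGetD img_shape idx 0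
      PySem.Dict.insert dims d dim_size
    else dims) dims
  dims.items

-- ===== PORT B =====
-- the body of B's for-loop (dims, seen are the two accumulators; p = (i, ch))
def pvStepB (img_shape : List Int) (st : PySem.Dict String Int × PySem.Set Char)
    (p : Int × Char) : PySem.Dict String Int × PySem.Set Char :=
  if PySem.Dict.contains st.1 (String.ofList [p.2]) && !(PySem.Set.contains st.2 p.2) then
    (PySem.Dict.insert st.1 (String.ofList [p.2]) (PySem.List.pyGetD img_shape p.1 0),
     PySem.Set.add st.2 p.2)
  else st

def get_dimension_size_alt (img_axes : String) (img_shape : List Int) : List (String × Int) :=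
  -- dims = {'T': 1, 'Z': 1, 'C': 1}; seen = set(); for i, ch in enumerate(img_axes): …
  ((PySem.List.enumerate img_axes.toList).foldl (pvStepB img_shape)
    (PySem.Dict.ofList [("T", 1), ("Z", 1), ("C", 1)], PySem.Set.empty)).1.items

-- ===== PRECONDITION & SPEC =====
-- Pre_ excludes exactly the inputs where Python A raises IndexError: some dimension key occurs
-- in img_axes but its first occurrence index is past the end of img_shape.
def Pre_get_dimension_size (img_axes : String) (img_shape : List Int) : Prop :=
  ((['T', 'Z', 'C'] : List Char).all (fun c =>
    !(img_axes.toList.contains c) ||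
      decide ((img_axes.toList.idxOf c : Int) < img_shape.length))) = true
instance (img_axes : String) (img_shape : List Int) : Decidable (Pre_get_dimension_size img_axes img_shape) := by unfold Pre_get_dimension_size; infer_instance

def pvWitness_get_dimension_size : String × List Int := ("TZ", [4, 5])

def Spec_get_dimension_size (img_axes : String) (img_shape : List Int) (out : List (String × Int)) : Prop := out = get_dimension_size_alt img_axes img_shape
instance (img_axes : String) (img_shape : List Int) (out : List (String × Int)) : Decidable (Spec_get_dimension_size img_axes img_shape out) := by unfold Spec_get_dimension_size; infer_instance

-- ===== CLAIM (what is proved, stated in full; the proofs are below) =====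
def Claim_equal_get_dimension_size : Prop := ∀ (img_axes : String) (img_shape : List Int), Dom_get_dimension_size img_axes img_shape → Pre_get_dimension_size img_axes img_shape → Spec_get_dimension_size img_axes img_shape (get_dimension_size img_axes img_shape)

-- ===== LEMMAS AND PROOFS =====

-- the common value both programs assign to a dimension key c
def pvVal (l : List Char) (shape : List Int) (c : Char) : Int :=
  if c ∈ l then PySem.List.pyGetD shape (l.idxOf c : Int) 0 else 1

theorem pv_ofList_single_eq (c d : Char) : (String.ofList [c] = String.ofList [d]) ↔ c = d := by
  constructor
  · intro h; have := congrArg String.toList h; simpa using this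
  · rintro rfl; rfl

theorem pv_lit_beq (d c : Char) : ((String.ofList [d]) == String.ofList [c]) = (d == c) := by
  by_cases h : d = c
  · subst h; simp
  · have h1 : ¬ String.ofList [d] = String.ofList [c] := fun hh => h ((pv_ofList_single_eq d c).1 hh)
    simp [h, h1]

theorem pv_find_go_single (c : Char) (l : List Char) (k : Nat) :
    PySem.Chars.find.go [c] l k = if l.contains c then ((k + l.idxOf c : Nat) : Int) else -1 := by
  induction l generalizing k with
  | nil => simp [PySem.Chars.find.go]
  | cons h t ih =>
    rw [PySem.Chars.find.go]
    by_cases hc : h = c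
    · subst hc; simp [List.isPrefixOf]
    · have hbc : (c == h) = false := by simp [Ne.symm hc]
      have hbc' : (h == c) = false := by simp [hc]
      have hpre : ([c].isPrefixOf (h :: t)) = false := by simp [List.isPrefixOf, hbc]
      rw [hpre]
      simp only [Bool.false_eq_true, if_false, ih]
      have hcc : (h :: t).contains c = t.contains c := by
        rw [List.contains_cons, hbc, Bool.false_or]
      rw [hcc, List.idxOf_cons, hbc']
      simp only [cond_false]
      split
      · omega
      · rfl

theorem pv_isIn_single (c : Char) (l : List Char) :
    PySem.Chars.isIn [c] l = l.contains c := by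
  simp only [PySem.Chars.isIn, PySem.Chars.find, pv_find_go_single]
  by_cases h : l.contains c = true
  · rw [if_pos h, h]
    simp only [bne_iff_ne, ne_eq, decide_eq_true_eq]
    omega
  · have hf : c ∉ l := by simpa using h
    rw [if_neg (by simpa using h), show l.contains c = false by simpa using hf]
    decide

theorem pv_find_single (c : Char) (l : List Char) (h : c ∈ l) :
    PySem.Chars.find l [c] = (l.idxOf c : Int) := by
  have hb : l.contains c = true := by simpa using h
  simp only [PySem.Chars.find, pv_find_go_single]
  rw [if_pos hb]; simp

theorem pv_insT (tv zv cv v : Int) :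
    PySem.Dict.insert (PySem.Dict.mk [("T", tv), ("Z", zv), ("C", cv)]) "T" v =
      PySem.Dict.mk [("T", v), ("Z", zv), ("C", cv)] := by
  simp [PySem.Dict.insert, PySem.Dict.contains,
    show (("Z" : String) == "T") = false from rfl, show (("C" : String) == "T") = false from rfl]

theorem pv_insZ (tv zv cv v : Int) :
    PySem.Dict.insert (PySem.Dict.mk [("T", tv), ("Z", zv), ("C", cv)]) "Z" v =
      PySem.Dict.mk [("T", tv), ("Z", v), ("C", cv)] := by
  simp [PySem.Dict.insert, PySem.Dict.contains,
    show (("T" : String) == "Z") = false from rfl, show (("C" : String) == "Z") = false from rfl]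

theorem pv_insC (tv zv cv v : Int) :
    PySem.Dict.insert (PySem.Dict.mk [("T", tv), ("Z", zv), ("C", cv)]) "C" v =
      PySem.Dict.mk [("T", tv), ("Z", zv), ("C", v)] := by
  simp [PySem.Dict.insert, PySem.Dict.contains,
    show (("T" : String) == "C") = false from rfl, show (("Z" : String) == "C") = false from rfl]

theorem pv_A_eval (img_axes : String) (img_shape : List Int) :
    get_dimension_size img_axes img_shape =
      [("T", pvVal img_axes.toList img_shape 'T'),
       ("Z", pvVal img_axes.toList img_shape 'Z'),
       ("C", pvVal img_axes.toList img_shape 'C')] := by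
  have hT : PySem.Str.isIn "T" img_axes = img_axes.toList.contains 'T' := by
    simp [PySem.Str.isIn, pv_isIn_single]
  have hZ : PySem.Str.isIn "Z" img_axes = img_axes.toList.contains 'Z' := by
    simp [PySem.Str.isIn, pv_isIn_single]
  have hC : PySem.Str.isIn "C" img_axes = img_axes.toList.contains 'C' := by
    simp [PySem.Str.isIn, pv_isIn_single]
  unfold get_dimension_size
  rw [show PySem.Dict.ofList [("T", (1:Int)), ("Z", 1), ("C", 1)] =
    PySem.Dict.mk [("T", 1), ("Z", 1), ("C", 1)] from rfl]
  simp only [List.foldl, hT, hZ, hC]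
  by_cases h1 : 'T' ∈ img_axes.toList <;>
    by_cases h2 : 'Z' ∈ img_axes.toList <;>
      by_cases h3 : 'C' ∈ img_axes.toList <;>
        simp [h1, h2, h3, PySem.Str.find, pv_find_single, pvVal, pv_insT, pv_insZ, pv_insC]

-- value of key c at the end of B's loop, given the remaining (index, char) pairs and the seen set
def pvUpd (shape : List Int) (ps : List (Int × Char)) (seen : List Char) (c : Char) (v : Int) : Int :=
  if c ∈ seen then v else
    match ps.find? (fun p => p.2 == c) with
    | some p => PySem.List.pyGetD shape p.1 0
    | none => v

theorem pvUpd_cons_ne (shape : List Int) (i : Int) (d : Char) (ps : List (Int × Char))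
    (seen : List Char) (c : Char) (v : Int) (h : ¬ d = c) :
    pvUpd shape ((i, d) :: ps) seen c v = pvUpd shape ps seen c v := by
  simp [pvUpd, h]

theorem pvUpd_cons_self_notseen (shape : List Int) (i : Int) (ps : List (Int × Char))
    (seen : List Char) (c : Char) (v : Int) (h : c ∉ seen) :
    pvUpd shape ((i, c) :: ps) seen c v = PySem.List.pyGetD shape i 0 := by
  simp [pvUpd, h]

theorem pvUpd_seen (shape : List Int) (ps : List (Int × Char))
    (seen : List Char) (c : Char) (v : Int) (h : c ∈ seen) :
    pvUpd shape ps seen c v = v := by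
  simp [pvUpd, h]

theorem pvUpd_add_ne (shape : List Int) (ps : List (Int × Char))
    (seen : PySem.Set Char) (x c : Char) (v : Int) (h : ¬ c = x) :
    pvUpd shape ps (PySem.Set.add seen x) c v = pvUpd shape ps seen c v := by
  by_cases hm : c ∈ seen
  · have hmem : c ∈ PySem.Set.add seen x := (PySem.Set.mem_add seen x c).mpr (Or.inl hm)
    simp [pvUpd, hm, hmem]
  · have hmem : c ∉ PySem.Set.add seen x := fun hh => by
      rcases (PySem.Set.mem_add seen x c).mp hh with h' | h'
      · exact hm h'
      · exact h h'
    simp [pvUpd, hm, hmem]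

theorem pvUpd_append_ne (shape : List Int) (ps : List (Int × Char))
    (seen : List Char) (x c : Char) (v : Int) (h : ¬ c = x) :
    pvUpd shape ps (seen ++ [x]) c v = pvUpd shape ps seen c v := by
  by_cases hm : c ∈ seen <;> simp [pvUpd, hm, h]

theorem pv_dict3_contains (tv zv cv : Int) (ch : Char) :
    PySem.Dict.contains (PySem.Dict.mk [("T", tv), ("Z", zv), ("C", cv)]) (String.ofList [ch]) =
      (ch == 'T' || ch == 'Z' || ch == 'C') := by
  simp only [PySem.Dict.contains, List.any_cons, List.any_nil,
    show ("T" : String) = String.ofList ['T'] from rfl,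
    show ("Z" : String) = String.ofList ['Z'] from rfl,
    show ("C" : String) = String.ofList ['C'] from rfl, pv_lit_beq]
  by_cases h1 : ch = 'T' <;> by_cases h2 : ch = 'Z' <;> by_cases h3 : ch = 'C' <;>
    simp [h1, h2, h3, Bool.or_assoc] <;> simp_all [BEq.comm]

theorem pv_B_loop (shape : List Int) (ps : List (Int × Char)) :
    ∀ (tv zv cv : Int) (seen : PySem.Set Char),
    ((ps.foldl (pvStepB shape) (PySem.Dict.mk [("T", tv), ("Z", zv), ("C", cv)], seen)).1 :
      PySem.Dict String Int) =
      PySem.Dict.mk [("T", pvUpd shape ps seen 'T' tv),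
                     ("Z", pvUpd shape ps seen 'Z' zv),
                     ("C", pvUpd shape ps seen 'C' cv)] := by
  induction ps with
  | nil => intro tv zv cv seen; simp [pvUpd]
  | cons p ps ih =>
    intro tv zv cv seen
    obtain ⟨i, ch⟩ := p
    rw [List.foldl_cons]
    by_cases hT : ch = 'T'
    · subst hT
      by_cases hm : 'T' ∈ seen
      · rw [show pvStepB shape (PySem.Dict.mk [("T", tv), ("Z", zv), ("C", cv)], seen) (i, 'T') =
            (PySem.Dict.mk [("T", tv), ("Z", zv), ("C", cv)], seen) by
          simp [pvStepB, PySem.Set.contains, hm]]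
        rw [ih]
        simp [pvUpd_cons_ne, pvUpd_seen, hm]
      · rw [show pvStepB shape (PySem.Dict.mk [("T", tv), ("Z", zv), ("C", cv)], seen) (i, 'T') =
            (PySem.Dict.mk [("T", PySem.List.pyGetD shape i 0), ("Z", zv), ("C", cv)],
              PySem.Set.add seen 'T') by
          simp [pvStepB, pv_dict3_contains, PySem.Set.contains, hm,
            show (String.ofList ['T'] : String) = "T" from rfl, pv_insT]]
        rw [ih]
        simp [pvUpd_cons_ne, pvUpd_cons_self_notseen, pvUpd_seen, pvUpd_add_ne,
          pvUpd_append_ne, hm, PySem.Set.mem_add]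
    · by_cases hZ : ch = 'Z'
      · subst hZ
        by_cases hm : 'Z' ∈ seen
        · rw [show pvStepB shape (PySem.Dict.mk [("T", tv), ("Z", zv), ("C", cv)], seen) (i, 'Z') =
              (PySem.Dict.mk [("T", tv), ("Z", zv), ("C", cv)], seen) by
            simp [pvStepB, PySem.Set.contains, hm]]
          rw [ih]
          simp [pvUpd_cons_ne, pvUpd_seen, hm]
        · rw [show pvStepB shape (PySem.Dict.mk [("T", tv), ("Z", zv), ("C", cv)], seen) (i, 'Z') =
              (PySem.Dict.mk [("T", tv), ("Z", PySem.List.pyGetD shape i 0), ("C", cv)],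
                PySem.Set.add seen 'Z') by
            simp [pvStepB, pv_dict3_contains, PySem.Set.contains, hm,
              show (String.ofList ['Z'] : String) = "Z" from rfl, pv_insZ]]
          rw [ih]
          simp [pvUpd_cons_ne, pvUpd_cons_self_notseen, pvUpd_seen, pvUpd_add_ne,
            pvUpd_append_ne, hm, PySem.Set.mem_add]
      · by_cases hC : ch = 'C'
        · subst hC
          by_cases hm : 'C' ∈ seen
          · rw [show pvStepB shape (PySem.Dict.mk [("T", tv), ("Z", zv), ("C", cv)], seen) (i, 'C') =
                (PySem.Dict.mk [("T", tv), ("Z", zv), ("C", cv)], seen) by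
              simp [pvStepB, PySem.Set.contains, hm]]
            rw [ih]
            simp [pvUpd_cons_ne, pvUpd_seen, hm]
          · rw [show pvStepB shape (PySem.Dict.mk [("T", tv), ("Z", zv), ("C", cv)], seen) (i, 'C') =
                (PySem.Dict.mk [("T", tv), ("Z", zv), ("C", PySem.List.pyGetD shape i 0)],
                  PySem.Set.add seen 'C') by
              simp [pvStepB, pv_dict3_contains, PySem.Set.contains, hm,
                show (String.ofList ['C'] : String) = "C" from rfl, pv_insC]]
            rw [ih]
            simp [pvUpd_cons_ne, pvUpd_cons_self_notseen, pvUpd_seen, pvUpd_add_ne,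
              pvUpd_append_ne, hm, PySem.Set.mem_add]
        · have hcon : PySem.Dict.contains
              (PySem.Dict.mk [("T", tv), ("Z", zv), ("C", cv)]) (String.ofList [ch]) = false := by
            rw [pv_dict3_contains]; simp [hT, hZ, hC]
          rw [show pvStepB shape (PySem.Dict.mk [("T", tv), ("Z", zv), ("C", cv)], seen) (i, ch) =
              (PySem.Dict.mk [("T", tv), ("Z", zv), ("C", cv)], seen) by
            simp [pvStepB, hcon]]
          rw [ih]
          simp [pvUpd_cons_ne, hT, hZ, hC]

theorem pv_find?_enum (l : List Char) (c : Char) (k : Int) :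
    (PySem.List.enumerate l k).find? (fun p => p.2 == c) =
      if l.contains c then some (k + (l.idxOf c : Int), c) else none := by
  induction l generalizing k with
  | nil => simp [PySem.List.enumerate]
  | cons h t ih =>
    by_cases hc : h = c
    · subst hc; simp [PySem.List.enumerate]
    · have hbc' : (h == c) = false := by simp [hc]
      have hbc : (c == h) = false := by simp [Ne.symm hc]
      simp only [PySem.List.enumerate, List.find?, hbc', ih,
        List.contains_cons, hbc, Bool.false_or, List.idxOf_cons]
      simp only [cond_false]
      split
      · simp only [Option.some.injEq, Prod.mk.injEq]
        refine ⟨by push_cast; ring, trivial⟩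
      · rfl

theorem pv_B_eval (img_axes : String) (img_shape : List Int) :
    get_dimension_size_alt img_axes img_shape =
      [("T", pvVal img_axes.toList img_shape 'T'),
       ("Z", pvVal img_axes.toList img_shape 'Z'),
       ("C", pvVal img_axes.toList img_shape 'C')] := by
  unfold get_dimension_size_alt
  rw [show PySem.Dict.ofList [("T", (1:Int)), ("Z", 1), ("C", 1)] =
    PySem.Dict.mk [("T", 1), ("Z", 1), ("C", 1)] from rfl]
  rw [show (PySem.Set.empty : PySem.Set Char) = ([] : List Char) from rfl]
  rw [pv_B_loop]
  simp only [pvUpd, pvVal, pv_find?_enum, List.not_mem_nil, if_false]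
  by_cases h1 : 'T' ∈ img_axes.toList <;>
    by_cases h2 : 'Z' ∈ img_axes.toList <;>
      by_cases h3 : 'C' ∈ img_axes.toList <;>
        simp [h1, h2, h3]

-- ===== VERDICT (by name: the statement is the Claim_ definition above) =====
theorem get_dimension_size_spec : Claim_equal_get_dimension_size := by
  intro img_axes img_shape _ _
  unfold Spec_get_dimension_size
  rw [pv_A_eval, pv_B_eval]
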